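-- pv_equiv track=rewrite | github.com/siravvix/envoy-cli | envoy/sort.py | move_key
-- ===== SOURCE A (Python) =====
-- from typing import Dict, List, Optional
--
-- def move_key(
--     env: Dict[str, str],
--     key: str,
--     position: int,
-- ) -> Dict[str, str]:
--     """Move a key to a specific index position. Raises KeyError if key not found."""
--     if key not in env:
--         raise KeyError(f"Key '{key}' not found in env.")
--     items = [(k, v) for k, v in env.items() if k != key]
--     position = max(0, min(position, len(items)))
--     items.insert(position, (key, env[key]))
--     return dict(items)
-- ===== SOURCE B (Python) =====
-- def move_key(env, key, position):
--     if key not in env: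
--         raise KeyError(f"Key '{key}' not found in env.")
--     pos = max(0, min(position, len(env) - 1))
--     result = {}
--     i = 0
--     for k, v in env.items():
--         if k == key:
--             continue
--         if i == pos:
--             result[key] = env[key]
--         result[k] = v
--         i += 1
--     if key not in result:
--         result[key] = env[key]
--     return result
-- ===== Notes on version B (the rewrite author's own statement) =====
-- stated objective: alternative
-- what changed: Instead of A's filter-comprehension building an items list, list.insert at the clamped position and a dict() materialization, B clamps the target position up front and rebuilds the dict in a single index-counting pass over env.items(), inserting the moved key when the counter reaches the position (or at the end if it never does).
import Mathlib
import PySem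

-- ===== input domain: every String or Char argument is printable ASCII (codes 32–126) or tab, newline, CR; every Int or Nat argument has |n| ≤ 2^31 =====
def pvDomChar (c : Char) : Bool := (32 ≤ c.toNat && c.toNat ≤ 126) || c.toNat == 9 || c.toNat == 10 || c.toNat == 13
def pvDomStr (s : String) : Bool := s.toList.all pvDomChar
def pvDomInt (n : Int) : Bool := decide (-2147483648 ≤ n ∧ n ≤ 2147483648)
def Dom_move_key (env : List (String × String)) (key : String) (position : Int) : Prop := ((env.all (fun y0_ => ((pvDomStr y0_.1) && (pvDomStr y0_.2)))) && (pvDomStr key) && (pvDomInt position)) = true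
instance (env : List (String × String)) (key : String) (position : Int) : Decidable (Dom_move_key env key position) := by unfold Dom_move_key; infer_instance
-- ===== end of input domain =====

-- B rebuilds the dict in one pass with an index counter (insertion position clamped up front),
-- instead of A's filter-list + list.insert + dict() materialization; objective: alternative decomposition.


-- ===== PORT A =====
-- dict lookup of `key` (first match = the dict's entry); `none` is the `raise KeyError` path
def move_key (env : List (String × String)) (key : String) (position : Int) : List (String × String) :=
  match env.find? (fun kv => kv.1 == key) with
  | none => []  -- raise KeyError (excluded by Pre_)
  | some kv =>
    let items := env.filter (fun p => !(p.1 == key))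
    let position := max 0 (min position (items.length : Int))
    (PySem.Dict.ofList (PySem.List.insert items position (key, kv.2))).items

-- ===== PORT B =====
-- the single pass of Source B: skip `key`, insert (key, v) when the counter i hits pos, append at the end if never inserted
def moveGo (key v : String) (pos : Int) : List (String × String) → Nat → PySem.Dict String String → PySem.Dict String String
  | [], _, d => if d.contains key then d else d.insert key v
  | p :: rest, i, d =>
    if p.1 == key then moveGo key v pos rest i d
    else if (i : Int) = pos then moveGo key v pos rest (i+1) ((d.insert key v).insert p.1 p.2)
    else moveGo key v pos rest (i+1) (d.insert p.1 p.2)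

def move_key_alt (env : List (String × String)) (key : String) (position : Int) : List (String × String) :=
  match env.find? (fun kv => kv.1 == key) with
  | none => []  -- raise KeyError (excluded by Pre_)
  | some kv =>
    let pos := max 0 (min position ((env.length : Int) - 1))
    (moveGo key kv.2 pos env 0 PySem.Dict.empty).items

-- ===== PRECONDITION & SPEC =====
-- env encodes a Python dict, so its keys are distinct; A raises KeyError exactly when key is absent.
def Pre_move_key (env : List (String × String)) (key : String) (position : Int) : Prop :=
  (env.map Prod.fst).Nodup ∧ key ∈ env.map Prod.fst
instance (env : List (String × String)) (key : String) (position : Int) : Decidable (Pre_move_key env key position) := by unfold Pre_move_key; infer_instance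

def pvWitness_move_key : (List (String × String)) × String × Int := ([("a","1"),("b","2")], "a", 1)

def Spec_move_key (env : List (String × String)) (key : String) (position : Int) (out : List (String × String)) : Prop := out = move_key_alt env key position
instance (env : List (String × String)) (key : String) (position : Int) (out : List (String × String)) : Decidable (Spec_move_key env key position out) := by unfold Spec_move_key; infer_instance

-- ===== CLAIM (what is proved, stated in full; the proofs are below) =====
def Claim_equal_move_key : Prop := ∀ (env : List (String × String)) (key : String) (position : Int), Dom_move_key env key position → Pre_move_key env key position → Spec_move_key env key position (move_key env key position)

-- ===== LEMMAS AND PROOFS =====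

-- the pass of Source B never looks at the entries whose key is `key` except to skip them
theorem moveGo_filter (key v : String) (pos : Int) :
    ∀ (l : List (String × String)) (i : Nat) (d : PySem.Dict String String),
    moveGo key v pos l i d = moveGo key v pos (l.filter (fun p => !(p.1 == key))) i d := by
  intro l
  induction l with
  | nil => intro i d; rfl
  | cons p rest ih =>
    intro i d
    by_cases h : p.1 = key
    · simp [moveGo, h, ih]
    · by_cases hi : (i : Int) = pos <;> simp [moveGo, h, hi, ih]

-- phase 2: the counter is already past pos and `key` already sits in d: every remaining item is appended
theorem moveGo_ge (key v : String) (n : Nat) :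
    ∀ (m : List (String × String)) (i : Nat) (d : PySem.Dict String String),
    n < i → key ∉ m.map Prod.fst → (∀ p ∈ m, d.contains p.1 = false) →
    (m.map Prod.fst).Nodup → d.contains key = true →
    (moveGo key v (n : Int) m i d).items = d.items ++ m := by
  intro m
  induction m with
  | nil => intro i d hi _ _ _ hk; simp [moveGo, hk]
  | cons p rest ih =>
    intro i d hi hkm hfresh hnd hk
    have hkm' : key ≠ p.1 ∧ key ∉ rest.map Prod.fst := by
      simpa [not_or] using hkm
    have hpk : p.1 ≠ key := fun h => hkm'.1 h.symm
    have hnd' : (p.1 :: rest.map Prod.fst).Nodup := by simpa using hnd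
    have hp1 : p.1 ∉ rest.map Prod.fst := (List.nodup_cons.mp hnd').1
    have hndrest : (rest.map Prod.fst).Nodup := (List.nodup_cons.mp hnd').2
    have hpf : d.contains p.1 = false := hfresh p (by simp)
    have hrest : ∀ q ∈ rest, (d.insert p.1 p.2).contains q.1 = false := by
      intro q hq
      have hne : q.1 ≠ p.1 := fun h => hp1 (List.mem_map.mpr ⟨q, hq, h⟩)
      rw [PySem.Dict.contains_insert]
      simp [hne, hfresh q (by simp [hq])]
    rw [moveGo, if_neg (by simp [hpk]), if_neg (by intro h; omega)]
    rw [ih (i+1) _ (by omega) hkm'.2 hrest hndrest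
        (by rw [PySem.Dict.contains_insert]; simp [hk]),
      PySem.Dict.items_insert_of_not_contains _ _ hpf]
    simp

-- phase 1: the counter has not yet reached pos; (key, v) lands n - i items further on (or at the end)
theorem moveGo_lt (key v : String) (n : Nat) :
    ∀ (m : List (String × String)) (i : Nat) (d : PySem.Dict String String),
    i ≤ n → key ∉ m.map Prod.fst → (∀ p ∈ m, d.contains p.1 = false) →
    (m.map Prod.fst).Nodup → d.contains key = false →
    (moveGo key v (n : Int) m i d).items
      = d.items ++ (m.take (n - i) ++ (key, v) :: m.drop (n - i)) := by
  intro m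
  induction m with
  | nil =>
    intro i d _ _ _ _ hk
    simp [moveGo, hk, PySem.Dict.items_insert_of_not_contains _ _ hk]
  | cons p rest ih =>
    intro i d hi hkm hfresh hnd hk
    have hkm' : key ≠ p.1 ∧ key ∉ rest.map Prod.fst := by
      simpa [not_or] using hkm
    have hpk : p.1 ≠ key := fun h => hkm'.1 h.symm
    have hnd' : (p.1 :: rest.map Prod.fst).Nodup := by simpa using hnd
    have hp1 : p.1 ∉ rest.map Prod.fst := (List.nodup_cons.mp hnd').1
    have hndrest : (rest.map Prod.fst).Nodup := (List.nodup_cons.mp hnd').2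
    have hpf : d.contains p.1 = false := hfresh p (by simp)
    have hrestne : ∀ q ∈ rest, q.1 ≠ p.1 :=
      fun q hq h => hp1 (List.mem_map.mpr ⟨q, hq, h⟩)
    rw [moveGo, if_neg (by simp [hpk])]
    by_cases hin : i = n
    · rw [if_pos (by exact_mod_cast hin)]
      have hk2 : ((d.insert key v).insert p.1 p.2).contains key = true := by
        rw [PySem.Dict.contains_insert, PySem.Dict.contains_insert_self]
        simp
      have hfresh2 : ∀ q ∈ rest, ((d.insert key v).insert p.1 p.2).contains q.1 = false := by
        intro q hq
        have hqk : q.1 ≠ key := fun h => hkm'.2 (List.mem_map.mpr ⟨q, hq, h⟩)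
        rw [PySem.Dict.contains_insert, PySem.Dict.contains_insert]
        simp [hrestne q hq, hqk, hfresh q (by simp [hq])]
      rw [moveGo_ge key v n rest (i+1) _ (by omega) hkm'.2 hfresh2 hndrest hk2]
      have hpf2 : (d.insert key v).contains p.1 = false := by
        rw [PySem.Dict.contains_insert]
        simp [hpk, hpf]
      rw [PySem.Dict.items_insert_of_not_contains _ _ hpf2,
          PySem.Dict.items_insert_of_not_contains _ _ hk]
      have h0 : n - i = 0 := by omega
      simp [h0]
    · rw [if_neg (by intro h; exact hin (by exact_mod_cast h))]
      have hfresh2 : ∀ q ∈ rest, (d.insert p.1 p.2).contains q.1 = false := by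
        intro q hq
        rw [PySem.Dict.contains_insert]
        simp [hrestne q hq, hfresh q (by simp [hq])]
      have hk2 : (d.insert p.1 p.2).contains key = false := by
        rw [PySem.Dict.contains_insert]
        simp [hkm'.1, hk]
      rw [ih (i+1) _ (by omega) hkm'.2 hfresh2 hndrest hk2,
          PySem.Dict.items_insert_of_not_contains _ _ hpf]
      have hsub : n - i = (n - (i+1)) + 1 := by omega
      rw [hsub]
      simp

-- ===== VERDICT (by name: the statement is the Claim_ definition above) =====
theorem move_key_spec : Claim_equal_move_key := by
  intro env key position _ hpre
  obtain ⟨hnd, hmem⟩ := hpre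
  obtain ⟨q, hq, hqk⟩ := List.mem_map.mp hmem
  obtain ⟨l1, l2, henv⟩ := List.append_of_mem hq
  have hq' : q = (key, q.2) := Prod.ext hqk rfl
  rw [hq'] at henv
  set v := q.2 with hv
  subst henv
  -- structure of the keys
  have hnd' : (key :: (l1.map Prod.fst ++ l2.map Prod.fst)).Nodup := by
    rw [← List.nodup_middle]
    simpa using hnd
  have hkl1 : key ∉ l1.map Prod.fst := fun h => (List.nodup_cons.mp hnd').1 (by simp [h])
  have hkl2 : key ∉ l2.map Prod.fst := fun h => (List.nodup_cons.mp hnd').1 (by simp [h])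
  have hnd12 : ((l1 ++ l2).map Prod.fst).Nodup := by
    simpa using (List.nodup_cons.mp hnd').2
  have hk12 : key ∉ (l1 ++ l2).map Prod.fst := by
    simp only [List.map_append, List.mem_append]
    exact fun h => h.elim (fun h => hkl1 h) (fun h => hkl2 h)
  -- the dict lookup finds (key, v)
  have hfind : (l1 ++ (key, v) :: l2).find? (fun kv => kv.1 == key) = some (key, v) := by
    have h1 : l1.find? (fun kv => kv.1 == key) = none := by
      rw [List.find?_eq_none]
      intro p hp hpk
      exact hkl1 (List.mem_map.mpr ⟨p, hp, by simpa using hpk⟩)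
    rw [List.find?_append, h1]
    simp [List.find?]
  -- the filtered list
  have hfil : (l1 ++ (key, v) :: l2).filter (fun p => !(p.1 == key)) = l1 ++ l2 := by
    have h1 : l1.filter (fun p => !(p.1 == key)) = l1 := by
      rw [List.filter_eq_self]
      intro p hp
      have : p.1 ≠ key := fun h => hkl1 (List.mem_map.mpr ⟨p, hp, h⟩)
      simp [this]
    have h2 : l2.filter (fun p => !(p.1 == key)) = l2 := by
      rw [List.filter_eq_self]
      intro p hp
      have : p.1 ≠ key := fun h => hkl2 (List.mem_map.mpr ⟨p, hp, h⟩)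
      simp [this]
    rw [List.filter_append, List.filter_cons]
    simp [h1, h2]
  simp only [Spec_move_key, move_key, move_key_alt, hfind, hfil]
  have hlen2 : ((l1 ++ (key, v) :: l2).length : Int) - 1 = (((l1 ++ l2).length : Nat) : Int) := by
    simp only [List.length_append, List.length_cons]
    push_cast
    omega
  rw [hlen2]
  set n : Nat := (max 0 (min position (((l1 ++ l2).length : Nat) : Int))).toNat with hn
  have hpos : max 0 (min position (((l1 ++ l2).length : Nat) : Int)) = (n : Int) :=
    (Int.toNat_of_nonneg (le_max_left 0 _)).symm
  have hnL : n ≤ (l1 ++ l2).length := by omega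
  rw [hpos, PySem.List.insert_natCast _ _ _ hnL]
  set T : List (String × String) := (l1 ++ l2).take n ++ (key, v) :: (l1 ++ l2).drop n with hT
  have hndT : (T.map Prod.fst).Nodup := by
    have hperm : List.Perm (T.map Prod.fst) (key :: (l1 ++ l2).map Prod.fst) := by
      have h1 : T.map Prod.fst
          = ((l1 ++ l2).take n).map Prod.fst ++ key :: ((l1 ++ l2).drop n).map Prod.fst := by
        simp [hT]
      have h2 := List.perm_middle (a := key) (l₁ := ((l1 ++ l2).take n).map Prod.fst)
        (l₂ := ((l1 ++ l2).drop n).map Prod.fst)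
      have h3 : ((l1 ++ l2).take n).map Prod.fst ++ ((l1 ++ l2).drop n).map Prod.fst
          = (l1 ++ l2).map Prod.fst := by
        rw [← List.map_append, List.take_append_drop]
      rw [h3] at h2
      rw [h1]
      exact h2
    exact hperm.symm.nodup (List.nodup_cons.mpr ⟨hk12, hnd12⟩)
  have hA : (PySem.Dict.ofList T).items = T := by
    have e : PySem.Dict.ofList T
        = T.foldl (fun d a => d.insert a.1 a.2) PySem.Dict.empty := rfl
    have h := PySem.Dict.items_foldl_insert_fresh T Prod.fst Prod.snd PySem.Dict.empty
      (fun a _ => PySem.Dict.contains_empty _) hndT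
    rw [e]
    simpa using h
  rw [hA, moveGo_filter, hfil,
      moveGo_lt key v n (l1 ++ l2) 0 PySem.Dict.empty (Nat.zero_le n) hk12
        (fun p _ => PySem.Dict.contains_empty _) hnd12 (PySem.Dict.contains_empty _)]
  simp [hT, PySem.Dict.empty]
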